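-- pv_equiv track=rewrite | github.com/rkn2/MayfieldSimulations | 8_generate_report.py | get_original_feature_name_for_report
-- ===== SOURCE A (Python) =====
-- def get_original_feature_name_for_report(processed_name, cat_features):
--     if processed_name.startswith('num__') or processed_name.startswith('remainder__'):
--         return processed_name.split('__', 1)[1]
--     if processed_name.startswith('cat__'):
--         processed_suffix = processed_name.split('__', 1)[1]
--         best_match = ''
--         for cat_name in cat_features:
--             if processed_suffix.startswith(cat_name + "_"):
--                 if len(cat_name) > len(best_match):
--                     best_match = cat_name
--         if best_match: return best_match
--     return processed_name.split('__', 1)[-1]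
-- ===== SOURCE B (Python) =====
-- def get_original_feature_name_for_report(processed_name, cat_features):
--     k = processed_name.find('__')
--     if k == -1:
--         return processed_name
--     rest = processed_name[k + 2:]
--     if processed_name[:k] == 'cat':
--         feats = set(cat_features)
--         for i in reversed(range(1, len(rest))):
--             if rest[i] == '_' and rest[:i] in feats:
--                 return rest[:i]
--     return rest
-- ===== Notes on version B (the rewrite author's own statement) =====
-- stated objective: alternative
-- what changed: B locates the first '__' once with find and slices prefix/rest from it (instead of A's three startswith tests plus repeated split calls), and for the cat prefix replaces A's keep-the-longest scan over every cat_feature by a backwards scan over the rest string's underscore split points with one set-membership test each, returning the first (longest) hit.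
import Mathlib
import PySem

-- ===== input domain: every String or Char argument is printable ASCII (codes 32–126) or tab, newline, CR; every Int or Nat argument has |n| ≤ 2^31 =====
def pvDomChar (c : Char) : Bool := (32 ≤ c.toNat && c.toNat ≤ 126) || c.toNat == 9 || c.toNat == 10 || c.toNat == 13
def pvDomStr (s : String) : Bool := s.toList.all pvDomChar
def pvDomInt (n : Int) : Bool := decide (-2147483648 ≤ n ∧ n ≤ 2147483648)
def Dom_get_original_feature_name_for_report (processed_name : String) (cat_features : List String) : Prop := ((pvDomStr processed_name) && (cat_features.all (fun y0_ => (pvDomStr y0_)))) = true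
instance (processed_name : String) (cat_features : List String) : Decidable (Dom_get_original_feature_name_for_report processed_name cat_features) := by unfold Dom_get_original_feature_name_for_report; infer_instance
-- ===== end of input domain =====

-- B locates the first '__' once with find and slices prefix/rest from it (instead of A's three
-- startswith tests and repeated split calls), and replaces A's keep-the-longest scan over every
-- cat_feature by a backwards scan over rest's underscore split points with set-membership tests.

-- ===== PORT A =====
def get_original_feature_name_for_report (processed_name : String) (cat_features : List String) : String :=
  let s := processed_name.toList
  if PySem.Chars.startswith s "num__".toList || PySem.Chars.startswith s "remainder__".toList then
    String.ofList (PySem.List.pyGetD ((PySem.Chars.splitMax? s "__".toList 1).getD []) 1 [])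
  else if PySem.Chars.startswith s "cat__".toList then
    let suffix := PySem.List.pyGetD ((PySem.Chars.splitMax? s "__".toList 1).getD []) 1 []
    let best := cat_features.foldl (fun best cat_name =>
      if PySem.Chars.startswith suffix (cat_name.toList ++ ['_']) then
        (if best.length < cat_name.toList.length then cat_name.toList else best)
      else best) []
    if best ≠ [] then String.ofList best
    else String.ofList (PySem.List.pyGetD ((PySem.Chars.splitMax? s "__".toList 1).getD []) (-1) [])
  else String.ofList (PySem.List.pyGetD ((PySem.Chars.splitMax? s "__".toList 1).getD []) (-1) [])

-- ===== PORT B =====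
def get_original_feature_name_for_report_alt (processed_name : String) (cat_features : List String) : String :=
  let s := processed_name.toList
  let k := PySem.Chars.find s "__".toList
  if k == -1 then processed_name
  else
    let rest := PySem.List.slice s (some (k + 2)) none
    if PySem.List.slice s none (some k) = "cat".toList then
      let feats : PySem.Set (List Char) := PySem.Set.ofList (cat_features.map String.toList)
      match ((PySem.List.pyRange 1 (rest.length : Int)).reverse).find?
          (fun i => (PySem.List.pyGet? rest i == some '_') &&
                    feats.contains (PySem.List.slice rest none (some i))) with
      | some i => String.ofList (PySem.List.slice rest none (some i))
      | none => String.ofList rest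
    else String.ofList rest

-- ===== PRECONDITION & SPEC =====
def Spec_get_original_feature_name_for_report (processed_name : String) (cat_features : List String) (out : String) : Prop := out = get_original_feature_name_for_report_alt processed_name cat_features
instance (processed_name : String) (cat_features : List String) (out : String) : Decidable (Spec_get_original_feature_name_for_report processed_name cat_features out) := by unfold Spec_get_original_feature_name_for_report; infer_instance

-- ===== CLAIM (what is proved, stated in full; the proofs are below) =====
def Claim_equal_get_original_feature_name_for_report : Prop := ∀ (processed_name : String) (cat_features : List String), Dom_get_original_feature_name_for_report processed_name cat_features → Spec_get_original_feature_name_for_report processed_name cat_features (get_original_feature_name_for_report processed_name cat_features)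

-- ===== LEMMAS AND PROOFS =====

-- index of the first occurrence of "__" (none if absent): the common spec of A's split and B's find
def pvFO : List Char → Option Nat
  | [] => none
  | c :: rest => if List.isPrefixOf ['_', '_'] (c :: rest) then some 0 else (pvFO rest).map (· + 1)

theorem pvSplitGoZero (sep : List Char) (fuel : Nat) (l cur : List Char) (acc : List (List Char)) :
    PySem.Chars.splitOnMax.go sep fuel 0 l cur acc = ((cur.reverse ++ l) :: acc).reverse := by
  cases fuel with
  | zero => rfl
  | succ f =>
    cases l with
    | nil => simp [PySem.Chars.splitOnMax.go]
    | cons c rest => rfl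

theorem pvSplitGoOne (fuel : Nat) (s cur : List Char) (acc : List (List Char)) (h : s.length ≤ fuel) :
    PySem.Chars.splitOnMax.go ['_', '_'] fuel 1 s cur acc =
      match pvFO s with
      | none => ((cur.reverse ++ s) :: acc).reverse
      | some i => acc.reverse ++ [cur.reverse ++ s.take i, s.drop (i + 2)] := by
  induction fuel generalizing s cur acc with
  | zero =>
    have hs : s = [] := List.length_eq_zero_iff.mp (by omega)
    subst hs; simp [pvFO, PySem.Chars.splitOnMax.go]
  | succ f ih =>
    cases s with
    | nil => simp [pvFO, PySem.Chars.splitOnMax.go]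
    | cons c rest =>
      have hstep : PySem.Chars.splitOnMax.go ['_', '_'] (f + 1) 1 (c :: rest) cur acc =
          if List.isPrefixOf ['_', '_'] (c :: rest) = true then
            PySem.Chars.splitOnMax.go ['_', '_'] f 0 (List.drop 2 (c :: rest)) [] (cur.reverse :: acc)
          else PySem.Chars.splitOnMax.go ['_', '_'] f 1 rest (c :: cur) acc := rfl
      rw [hstep]
      by_cases hp : List.isPrefixOf ['_', '_'] (c :: rest) = true
      · rw [if_pos hp, pvSplitGoZero]
        simp [pvFO, hp]
      · rw [if_neg hp, ih rest (c :: cur) acc (by simp at h; omega)]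
        simp only [pvFO, hp, Bool.false_eq_true, if_false]
        cases hfo : pvFO rest with
        | none => simp
        | some j =>
          have h1 : (c :: cur).reverse ++ rest.take j = cur.reverse ++ (c :: rest).take (j + 1) := by
            simp [List.take_succ_cons]
          have h2 : rest.drop (j + 2) = (c :: rest).drop (j + 1 + 2) := by
            simp [List.drop_succ_cons]
          simp only [Option.map_some]
          rw [h1, h2]

theorem pvFindGo (s : List Char) (k : Nat) :
    PySem.Chars.find.go ['_', '_'] s k =
      match pvFO s with
      | none => -1
      | some i => ((k + i : Nat) : Int) := by
  induction s generalizing k with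
  | nil => simp [pvFO]; rfl
  | cons c rest ih =>
    have hstep : PySem.Chars.find.go ['_', '_'] (c :: rest) k =
        if List.isPrefixOf ['_', '_'] (c :: rest) = true then (k : Int)
        else PySem.Chars.find.go ['_', '_'] rest (k + 1) := rfl
    rw [hstep]
    by_cases hp : List.isPrefixOf ['_', '_'] (c :: rest) = true
    · rw [if_pos hp]; simp [pvFO, hp]
    · rw [if_neg hp, ih (k + 1)]
      simp only [pvFO, hp, Bool.false_eq_true, if_false]
      cases hfo : pvFO rest with
      | none => simp
      | some j => simp only [Option.map_some]; push_cast; ring_nf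

theorem pvFindEq (s : List Char) :
    PySem.Chars.find s ['_', '_'] =
      match pvFO s with
      | none => -1
      | some i => (i : Int) := by
  have : PySem.Chars.find s ['_', '_'] = PySem.Chars.find.go ['_', '_'] s 0 := rfl
  rw [this, pvFindGo]
  cases pvFO s <;> simp

theorem pvSplitEq (s : List Char) :
    PySem.Chars.splitMax? s ['_', '_'] 1 =
      some (match pvFO s with
            | none => [s]
            | some i => [s.take i, s.drop (i + 2)]) := by
  have h1 : PySem.Chars.splitMax? s ['_', '_'] 1 =
      some (PySem.Chars.splitOnMax.go ['_', '_'] (s.length + 1) 1 s [] []) := rfl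
  rw [h1, pvSplitGoOne (s.length + 1) s [] [] (by omega)]
  cases pvFO s <;> simp

theorem pvFO_some_prefix (s : List Char) (k : Nat) (h : pvFO s = some k) :
    List.isPrefixOf ['_', '_'] (s.drop k) = true := by
  induction s generalizing k with
  | nil => simp [pvFO] at h
  | cons c rest ih =>
    by_cases hp : List.isPrefixOf ['_', '_'] (c :: rest) = true
    · simp [pvFO, hp] at h
      subst h; simpa using hp
    · simp [pvFO, hp] at h
      obtain ⟨j, hj, rfl⟩ := h
      simpa [List.drop_succ_cons] using ih j hj

theorem pvFO_num (t : List Char) : pvFO ('n' :: 'u' :: 'm' :: '_' :: '_' :: t) = some 3 := rfl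

theorem pvFO_rem (t : List Char) :
    pvFO ('r' :: 'e' :: 'm' :: 'a' :: 'i' :: 'n' :: 'd' :: 'e' :: 'r' :: '_' :: '_' :: t) = some 9 := rfl

theorem pvFO_cat (t : List Char) : pvFO ('c' :: 'a' :: 't' :: '_' :: '_' :: t) = some 3 := rfl

theorem pvTakeCat (s : List Char) (k : Nat) (hfo : pvFO s = some k)
    (htake : s.take k = ['c', 'a', 't']) :
    ∃ t, s = 'c' :: 'a' :: 't' :: '_' :: '_' :: t := by
  have hp := pvFO_some_prefix s k hfo
  have hlen : (s.take k).length = 3 := by rw [htake]; rfl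
  rw [List.length_take] at hlen
  have hk : k < s.length := by
    by_contra hge
    rw [List.drop_eq_nil_of_le (by omega)] at hp
    simp [List.isPrefixOf] at hp
  have hk3 : k = 3 := by omega
  subst hk3
  obtain ⟨u, hu⟩ : ['_', '_'] <+: s.drop 3 := List.isPrefixOf_iff_prefix.mp hp
  exact ⟨u, by rw [← List.take_append_drop 3 s, htake, ← hu]; rfl⟩

-- ===== the cat__ branch: A's kept-best fold equals B's backwards first-hit scan =====

-- canonical representative: the best match of length n is suffix.take n ([] when n = 0)
def pvCanon (suffix : List Char) (n : Nat) : List Char := if n = 0 then [] else suffix.take n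

-- the length fold mirroring A's best-match fold
def pvMF (suffix : List Char) (n : Nat) (cat : List Char) : Nat :=
  if PySem.Chars.startswith suffix (cat ++ ['_']) then max n cat.length else n

-- a matching cat is a prefix followed by '_': it is determined by its length
theorem pvMatch_spec (suffix cat : List Char)
    (h : PySem.Chars.startswith suffix (cat ++ ['_']) = true) :
    cat = suffix.take cat.length ∧ cat.length + 1 ≤ suffix.length ∧
      suffix.getD cat.length ' ' = '_' := by
  rw [PySem.Chars.startswith_iff] at h
  obtain ⟨t, ht⟩ := h
  refine ⟨?_, ?_, ?_⟩
  · have h1 : cat <+: suffix := ⟨'_' :: t, by simpa using ht⟩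
    exact List.prefix_iff_eq_take.mp h1
  · rw [← ht]; simp
  · rw [← ht]; simp [List.getD]

theorem pvMatch_of (suffix : List Char) (n : Nat) (hn : n < suffix.length)
    (hu : suffix.getD n ' ' = '_') :
    PySem.Chars.startswith suffix (suffix.take n ++ ['_']) = true := by
  rw [PySem.Chars.startswith_iff]
  have hd : suffix.drop n = suffix[n] :: suffix.drop (n+1) := List.drop_eq_getElem_cons hn
  have hg : suffix[n] = '_' := by rw [List.getD_eq_getElem _ _ hn] at hu; exact hu
  refine ⟨suffix.drop (n+1), ?_⟩
  rw [List.append_assoc, List.singleton_append, ← hg, ← hd, List.take_append_drop]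

theorem pvCanon_length (suffix : List Char) (n : Nat) (h : n ≤ suffix.length) :
    (pvCanon suffix n).length = n := by
  unfold pvCanon; split
  · simp_all
  · simp [h]

-- A's fold computes the canonical element of the length fold
theorem pvFoldA (suffix : List Char) (cfl : List (List Char)) (acc : List Char) (n : Nat)
    (hle : n ≤ suffix.length) (hacc : acc = pvCanon suffix n) :
    cfl.foldl (fun best cat =>
        if PySem.Chars.startswith suffix (cat ++ ['_']) then
          (if best.length < cat.length then cat else best)
        else best) acc = pvCanon suffix (cfl.foldl (pvMF suffix) n) ∧
      cfl.foldl (pvMF suffix) n ≤ suffix.length := by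
  induction cfl generalizing acc n with
  | nil => exact ⟨hacc, hle⟩
  | cons cat cfl ih =>
    simp only [List.foldl_cons]
    by_cases hP : PySem.Chars.startswith suffix (cat ++ ['_']) = true
    · obtain ⟨hc, hlen, _⟩ := pvMatch_spec suffix cat hP
      have hlacc : acc.length = n := hacc ▸ pvCanon_length suffix n hle
      by_cases hlt : acc.length < cat.length
      · have : (if PySem.Chars.startswith suffix (cat ++ ['_']) = true then
            (if acc.length < cat.length then cat else acc) else acc) = cat := by
          simp [hP, hlt]
        rw [this]
        have hmf : pvMF suffix n cat = cat.length := by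
          unfold pvMF; simp [hP]; omega
        rw [hmf]
        refine ih cat cat.length (by omega) ?_
        unfold pvCanon
        rw [if_neg (by omega)]
        exact hc
      · have : (if PySem.Chars.startswith suffix (cat ++ ['_']) = true then
            (if acc.length < cat.length then cat else acc) else acc) = acc := by
          simp [hP, hlt]
        rw [this]
        have hmf : pvMF suffix n cat = n := by unfold pvMF; simp [hP]; omega
        rw [hmf]
        exact ih acc n hle hacc
    · simp only [pvMF, hP, Bool.false_eq_true, if_false]
      exact ih acc n hle hacc

-- the length fold is an upper bound on matching lengths, and is attained (or is the seed)
theorem pvMFold_spec (suffix : List Char) (cfl : List (List Char)) (n : Nat) :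
    (∀ cat ∈ cfl, PySem.Chars.startswith suffix (cat ++ ['_']) = true →
        cat.length ≤ cfl.foldl (pvMF suffix) n) ∧
      n ≤ cfl.foldl (pvMF suffix) n ∧
      (cfl.foldl (pvMF suffix) n = n ∨ ∃ cat ∈ cfl,
        PySem.Chars.startswith suffix (cat ++ ['_']) = true ∧
          cfl.foldl (pvMF suffix) n = cat.length) := by
  induction cfl generalizing n with
  | nil => simp
  | cons cat cfl ih =>
    simp only [List.foldl_cons]
    obtain ⟨ihb, ihge, ihat⟩ := ih (pvMF suffix n cat)
    have hstep : n ≤ pvMF suffix n cat := by unfold pvMF; split <;> omega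
    refine ⟨?_, by omega, ?_⟩
    · intro c hc hPc
      rcases List.mem_cons.mp hc with rfl | hc
      · have : pvMF suffix n c = max n c.length := by unfold pvMF; simp [hPc]
        have := ihge; omega
      · exact ihb c hc hPc
    · rcases ihat with heq | ⟨c, hc, hPc, he⟩
      · rw [heq]
        by_cases hP : PySem.Chars.startswith suffix (cat ++ ['_']) = true
        · by_cases hge : cat.length ≤ n
          · left; unfold pvMF; simp [hP]; omega
          · right; exact ⟨cat, List.mem_cons_self, hP, by unfold pvMF; simp [hP]; omega⟩
        · left; unfold pvMF; simp [hP]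
      · right; exact ⟨c, List.mem_cons_of_mem _ hc, hPc, he⟩

-- find? over the reverse of a strictly increasing list returns the greatest satisfying element
theorem pvFind_max (l : List Int) (p : Int → Bool) (hl : l.Pairwise (· < ·)) (x : Int)
    (hx : x ∈ l) (hpx : p x = true) (hmax : ∀ y ∈ l, p y = true → y ≤ x) :
    l.reverse.find? p = some x := by
  induction l with
  | nil => simp at hx
  | cons a l ih =>
    rw [List.reverse_cons, List.find?_append]
    rcases List.mem_cons.mp hx with rfl | hx
    · have hnone : l.reverse.find? p = none := by
        rw [List.find?_eq_none]
        intro y hy hpy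
        have h1 : x < y := (List.pairwise_cons.mp hl).1 y (List.mem_reverse.mp hy)
        have h2 : y ≤ x := hmax y (List.mem_cons_of_mem _ (List.mem_reverse.mp hy)) hpy
        omega
      rw [hnone]
      simp [List.find?, hpx]
    · have := ih (List.pairwise_cons.mp hl).2 hx
        (fun y hy hpy => hmax y (List.mem_cons_of_mem _ hy) hpy)
      rw [this]
      rfl

-- the predicate B scans with holds at (k : Int) exactly when suffix.take k is a feature and suffix[k] = '_'
theorem pvPred_iff (suffix : List Char) (cfl : List (List Char)) (i : Int)
    (h1 : 1 ≤ i) (h2 : i < (suffix.length : Int)) :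
    ((PySem.List.pyGet? suffix i == some '_') &&
        (PySem.Set.ofList cfl).contains (PySem.List.slice suffix none (some i))) = true ↔
      (suffix.getD i.toNat ' ' = '_' ∧ suffix.take i.toNat ∈ cfl) := by
  obtain ⟨k, rfl⟩ : ∃ k : Nat, i = (k : Int) := ⟨i.toNat, by omega⟩
  have hk : k < suffix.length := by exact_mod_cast h2
  rw [Bool.and_eq_true, PySem.List.slice_to_natCast]
  simp only [Int.toNat_natCast, PySem.List.pyGet?_natCast,
    List.getElem?_eq_getElem hk, beq_iff_eq, Option.some.injEq]
  rw [List.getD_eq_getElem _ _ hk]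
  simp [PySem.Set.mem_ofList]

-- the cat__ branch: A's kept-best fold equals B's backwards first-hit scan
theorem pvCatCore (suffix : List Char) (cfl : List (List Char)) (fb : String) :
    (if (cfl.foldl (fun best cat =>
          if PySem.Chars.startswith suffix (cat ++ ['_']) then
            (if best.length < cat.length then cat else best)
          else best) [] : List Char) ≠ [] then
        String.ofList (cfl.foldl (fun best cat =>
          if PySem.Chars.startswith suffix (cat ++ ['_']) then
            (if best.length < cat.length then cat else best)
          else best) [])
      else fb) =
    (match ((PySem.List.pyRange 1 (suffix.length : Int)).reverse).find?
        (fun i => (PySem.List.pyGet? suffix i == some '_') &&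
          (PySem.Set.ofList cfl).contains (PySem.List.slice suffix none (some i))) with
      | some i => String.ofList (PySem.List.slice suffix none (some i))
      | none => fb) := by
  obtain ⟨hfold, hM⟩ := pvFoldA suffix cfl [] 0 (by omega) rfl
  obtain ⟨hub, -, hat⟩ := pvMFold_spec suffix cfl 0
  set M := cfl.foldl (pvMF suffix) 0 with hMdef
  rw [hfold]
  by_cases hM0 : M = 0
  · have hnone : ((PySem.List.pyRange 1 (suffix.length : Int)).reverse).find?
        (fun i => (PySem.List.pyGet? suffix i == some '_') &&
          (PySem.Set.ofList cfl).contains (PySem.List.slice suffix none (some i))) = none := by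
      rw [List.find?_eq_none]
      intro i hi
      have hmem := List.mem_reverse.mp hi
      obtain ⟨hi1, hi2⟩ := PySem.List.mem_pyRange_one.mp hmem
      intro hp
      obtain ⟨hu, hin⟩ := (pvPred_iff suffix cfl i hi1 hi2).mp hp
      have hkl : i.toNat < suffix.length := by omega
      have hsw := pvMatch_of suffix i.toNat hkl hu
      have := hub _ hin hsw
      rw [List.length_take] at this
      omega
    rw [hnone, hM0]
    simp [pvCanon]
  · rcases hat with h | ⟨cat, hcat, hP, hMlen⟩
    · omega
    obtain ⟨hceq, hclen, hcu⟩ := pvMatch_spec suffix cat hP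
    have hML : M < suffix.length := by omega
    have hfind : ((PySem.List.pyRange 1 (suffix.length : Int)).reverse).find?
        (fun i => (PySem.List.pyGet? suffix i == some '_') &&
          (PySem.Set.ofList cfl).contains (PySem.List.slice suffix none (some i))) =
        some (M : Int) := by
      apply pvFind_max _ _ (PySem.List.pairwise_lt_pyRange_one 1 _)
      · exact PySem.List.mem_pyRange_one.mpr ⟨by omega, by exact_mod_cast hML⟩
      · rw [pvPred_iff suffix cfl _ (by omega) (by exact_mod_cast hML)]
        refine ⟨by simpa [hMlen] using hcu, ?_⟩
        simp only [Int.toNat_natCast]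
        rw [hMlen, ← hceq]
        exact hcat
      · intro y hy hpy
        obtain ⟨hy1, hy2⟩ := PySem.List.mem_pyRange_one.mp hy
        obtain ⟨hu, hin⟩ := (pvPred_iff suffix cfl y hy1 hy2).mp hpy
        have hkl : y.toNat < suffix.length := by omega
        have := hub _ hin (pvMatch_of suffix y.toNat hkl hu)
        rw [List.length_take] at this
        omega
    rw [hfind]
    have hne : pvCanon suffix M ≠ [] := by
      unfold pvCanon
      rw [if_neg hM0]
      intro h
      have hz : (suffix.take M).length = 0 := by rw [h]; rfl
      rw [List.length_take] at hz
      omega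
    rw [if_pos hne]
    unfold pvCanon
    rw [if_neg hM0]
    simp [PySem.List.slice_to_natCast]

theorem pvFoldl_map (suffix : List Char) (cf : List String) (acc : List Char) :
    cf.foldl (fun best cat_name =>
        if PySem.Chars.startswith suffix (cat_name.toList ++ ['_']) then
          (if best.length < cat_name.toList.length then cat_name.toList else best)
        else best) acc =
      (cf.map String.toList).foldl (fun best cat =>
        if PySem.Chars.startswith suffix (cat ++ ['_']) then
          (if best.length < cat.length then cat else best)
        else best) acc := by
  induction cf generalizing acc with
  | nil => rfl
  | cons c cf ih =>
    simp only [List.foldl_cons, List.map_cons]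
    exact ih _

theorem pvMain (processed_name : String) (cat_features : List String) :
    get_original_feature_name_for_report processed_name cat_features =
      get_original_feature_name_for_report_alt processed_name cat_features := by
  unfold get_original_feature_name_for_report get_original_feature_name_for_report_alt
  simp only [show "__".toList = ['_', '_'] from rfl]
  by_cases hnum : PySem.Chars.startswith processed_name.toList "num__".toList = true
  · rw [PySem.Chars.startswith_iff] at hnum
    obtain ⟨t, ht⟩ := hnum
    have hs : processed_name.toList = 'n' :: 'u' :: 'm' :: '_' :: '_' :: t := by rw [← ht]; rfl
    have hfo : pvFO processed_name.toList = some 3 := by rw [hs]; exact pvFO_num t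
    have hsw : PySem.Chars.startswith processed_name.toList "num__".toList = true := by
      rw [PySem.Chars.startswith_iff]; exact ⟨t, ht⟩
    rw [if_pos (by rw [Bool.or_eq_true]; exact Or.inl hsw), pvSplitEq, hfo, pvFindEq, hfo, Option.getD_some]
    rw [if_neg (by decide)]
    rw [if_neg (by rw [PySem.List.slice_to_natCast, hs]; simp)]
    have h5 : ((3 : Nat) : Int) + 2 = ((5 : Nat) : Int) := by norm_num
    rw [h5, PySem.List.slice_from_natCast]
    simp [PySem.List.pyGetD, hs]
  · by_cases hrem : PySem.Chars.startswith processed_name.toList "remainder__".toList = true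
    · rw [PySem.Chars.startswith_iff] at hrem
      obtain ⟨t, ht⟩ := hrem
      have hs : processed_name.toList =
          'r' :: 'e' :: 'm' :: 'a' :: 'i' :: 'n' :: 'd' :: 'e' :: 'r' :: '_' :: '_' :: t := by
        rw [← ht]; rfl
      have hfo : pvFO processed_name.toList = some 9 := by rw [hs]; exact pvFO_rem t
      have hsw : PySem.Chars.startswith processed_name.toList "remainder__".toList = true := by
        rw [PySem.Chars.startswith_iff]; exact ⟨t, ht⟩
      rw [if_pos (by rw [Bool.or_eq_true]; exact Or.inr hsw), pvSplitEq, hfo, pvFindEq, hfo,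
        Option.getD_some]
      rw [if_neg (by decide)]
      rw [if_neg (by rw [PySem.List.slice_to_natCast, hs]; simp)]
      have h11 : ((9 : Nat) : Int) + 2 = ((11 : Nat) : Int) := by norm_num
      rw [h11, PySem.List.slice_from_natCast]
      simp [PySem.List.pyGetD, hs]
    · rw [if_neg (show ¬(PySem.Chars.startswith processed_name.toList "num__".toList ||
          PySem.Chars.startswith processed_name.toList "remainder__".toList) = true from by
        rw [Bool.or_eq_true]; rintro (h | h); exact hnum h; exact hrem h)]
      by_cases hcat : PySem.Chars.startswith processed_name.toList "cat__".toList = true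
      · rw [PySem.Chars.startswith_iff] at hcat
        obtain ⟨t, ht⟩ := hcat
        have hs : processed_name.toList = 'c' :: 'a' :: 't' :: '_' :: '_' :: t := by rw [← ht]; rfl
        have hfo : pvFO processed_name.toList = some 3 := by rw [hs]; exact pvFO_cat t
        have hsw : PySem.Chars.startswith processed_name.toList "cat__".toList = true := by
          rw [PySem.Chars.startswith_iff]; exact ⟨t, ht⟩
        have hsplit : PySem.Chars.splitMax? processed_name.toList ['_', '_'] 1 =
            some [List.take 3 processed_name.toList, List.drop 5 processed_name.toList] := by
          rw [pvSplitEq, hfo]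
        have hfind : PySem.Chars.find processed_name.toList ['_', '_'] = ((3 : Nat) : Int) := by
          rw [pvFindEq, hfo]
        rw [if_pos hsw, hsplit, hfind, Option.getD_some]
        rw [if_neg (show ¬((((3 : Nat) : Int)) == -1) = true from by decide)]
        rw [if_pos (show PySem.List.slice processed_name.toList none (some ((3 : Nat) : Int)) =
            "cat".toList from by rw [PySem.List.slice_to_natCast, hs]; rfl)]
        have h5 : ((3 : Nat) : Int) + 2 = ((5 : Nat) : Int) := by norm_num
        rw [h5, PySem.List.slice_from_natCast]
        have hget1 : PySem.List.pyGetD [List.take 3 processed_name.toList,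
            List.drop 5 processed_name.toList] (1 : Int) [] = List.drop 5 processed_name.toList := by
          simp [PySem.List.pyGetD]
        have hgetm1 : PySem.List.pyGetD [List.take 3 processed_name.toList,
            List.drop 5 processed_name.toList] (-1 : Int) [] = List.drop 5 processed_name.toList := by
          simp [PySem.List.pyGetD, PySem.List.pyGet?, PySem.List.pyIdx?]
        rw [hget1, hgetm1, pvFoldl_map]
        exact pvCatCore (List.drop 5 processed_name.toList) (cat_features.map String.toList)
          (String.ofList (List.drop 5 processed_name.toList))
      · rw [if_neg hcat]
        cases hfo : pvFO processed_name.toList with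
        | none =>
          have hsplit : PySem.Chars.splitMax? processed_name.toList ['_', '_'] 1 =
              some [processed_name.toList] := by rw [pvSplitEq, hfo]
          have hfind : PySem.Chars.find processed_name.toList ['_', '_'] = -1 := by
            rw [pvFindEq, hfo]
          rw [hsplit, hfind, Option.getD_some, if_pos (show ((-1 : Int) == -1) = true from rfl)]
          simp [PySem.List.pyGetD, PySem.List.pyGet?, PySem.List.pyIdx?]
        | some k =>
          have hsplit : PySem.Chars.splitMax? processed_name.toList ['_', '_'] 1 =
              some [List.take k processed_name.toList, List.drop (k + 2) processed_name.toList] := by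
            rw [pvSplitEq, hfo]
          have hfind : PySem.Chars.find processed_name.toList ['_', '_'] = ((k : Nat) : Int) := by
            rw [pvFindEq, hfo]
          rw [hsplit, hfind, Option.getD_some]
          rw [if_neg (show ¬(((k : Nat) : Int) == -1) = true from by simp)]
          have hne : ¬ PySem.List.slice processed_name.toList none (some (k : Int)) =
              "cat".toList := by
            rw [PySem.List.slice_to_natCast]
            intro hEq
            obtain ⟨t, hsp⟩ := pvTakeCat processed_name.toList k hfo (by rw [hEq]; rfl)
            refine hcat ?_
            rw [PySem.Chars.startswith_iff, hsp]
            exact ⟨t, rfl⟩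
          rw [if_neg hne]
          have hk2 : ((k : Nat) : Int) + 2 = (((k + 2 : Nat)) : Int) := by push_cast; ring
          rw [hk2, PySem.List.slice_from_natCast]
          simp [PySem.List.pyGetD, PySem.List.pyGet?, PySem.List.pyIdx?]

-- ===== VERDICT (by name: the statement is the Claim_ definition above) =====
theorem get_original_feature_name_for_report_spec : Claim_equal_get_original_feature_name_for_report := by
  intro pn cf _
  unfold Spec_get_original_feature_name_for_report
  exact pvMain pn cf
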